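-- pv_equiv track=rewrite | github.com/boojang/ktb-2-coding-test-study | Semi/백준/12주차/[1]가장많이받은선물.py | get_gift_index
-- ===== SOURCE A (Python) =====
-- def get_gift_index(gift_status):
--     n = len(gift_status)
--     gift_index = []
--     cols = list(zip(*gift_status))
--
--     for i in range(n):
--         given =sum(gift_status[i])
--         received =sum(cols[i])
--         received = sum(gift_status[j][i] for j in range(n))
--         gift_index.append(given-received)
--
--     return gift_index
-- ===== SOURCE B (Python) =====
-- def get_gift_index(gift_status):
--     n = len(gift_status)
--     received = [0] * n
--     given = []
--     for row in gift_status: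
--         given.append(sum(row))
--         received = [r + x for r, x in zip(received, row)]
--     return [g - r for g, r in zip(given, received)]
-- ===== Notes on version B (the rewrite author's own statement) =====
-- stated objective: faster
-- what changed: B makes one pass over the rows, accumulating each row's sum and an elementwise running column-sum vector, instead of A's zip-transpose plus a per-index generator that rescans all n rows for every i.
import Mathlib
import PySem

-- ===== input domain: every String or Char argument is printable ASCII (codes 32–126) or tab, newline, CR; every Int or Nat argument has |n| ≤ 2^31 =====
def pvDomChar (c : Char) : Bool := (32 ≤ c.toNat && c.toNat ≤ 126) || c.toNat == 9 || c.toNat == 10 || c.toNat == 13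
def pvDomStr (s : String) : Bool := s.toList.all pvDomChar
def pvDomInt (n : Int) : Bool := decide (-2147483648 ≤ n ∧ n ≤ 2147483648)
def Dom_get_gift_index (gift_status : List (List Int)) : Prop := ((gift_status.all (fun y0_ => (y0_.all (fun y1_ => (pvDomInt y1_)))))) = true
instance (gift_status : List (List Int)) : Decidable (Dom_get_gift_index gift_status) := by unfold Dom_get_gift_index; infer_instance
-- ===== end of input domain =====

-- B replaces A's zip-transpose and per-index rescans by one pass that accumulates row sums and a running column-sum vector (constant-factor less work; return value only).

-- ===== PORT A =====
-- hand port of Python zip(*rows): columns up to the shortest row length (exact; no PySem primitive)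
def pyZipStar (lss : List (List Int)) : List (List Int) :=
  match lss with
  | [] => []
  | l :: ls =>
    let m := ((l :: ls).map List.length).foldl min l.length
    (List.range m).map (fun i => (l :: ls).map (fun r => r.getD i 0))

def get_gift_index (gift_status : List (List Int)) : List Int :=
  let n : Int := gift_status.length
  let cols := pyZipStar gift_status
  (PySem.List.pyRange 0 n 1).foldl
    (fun gift_index i =>
      let given := (PySem.List.pyGetD gift_status i []).sum
      let _received := (PySem.List.pyGetD cols i []).sum  -- overwritten on the next line, as in A
      let received := ((PySem.List.pyRange 0 n 1).map
        (fun j => PySem.List.pyGetD (PySem.List.pyGetD gift_status j []) i 0)).sum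
      gift_index ++ [given - received]) []

-- ===== PORT B =====
def get_gift_index_alt (gift_status : List (List Int)) : List Int :=
  let n := gift_status.length
  let p := gift_status.foldl
    (fun (acc : List Int × List Int) row =>
      (acc.1 ++ [row.sum], List.zipWith (fun r x => r + x) acc.2 row))
    ([], List.replicate n 0)
  List.zipWith (fun g r => g - r) p.1 p.2

-- ===== PRECONDITION & SPEC =====
-- Pre_ excludes ragged inputs with a row shorter than the number of rows: there A raises IndexError (gift_status[j][i] / cols[i]).
def Pre_get_gift_index (gift_status : List (List Int)) : Prop :=
  ∀ row ∈ gift_status, gift_status.length ≤ row.length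
instance (gift_status : List (List Int)) : Decidable (Pre_get_gift_index gift_status) := by unfold Pre_get_gift_index; infer_instance
def pvWitness_get_gift_index : List (List Int) := [[0, 1], [1, 0]]
def Spec_get_gift_index (gift_status : List (List Int)) (out : List Int) : Prop := out = get_gift_index_alt gift_status
instance (gift_status : List (List Int)) (out : List Int) : Decidable (Spec_get_gift_index gift_status out) := by unfold Spec_get_gift_index; infer_instance

-- ===== CLAIM (what is proved, stated in full; the proofs are below) =====
def Claim_equal_get_gift_index : Prop := ∀ (gift_status : List (List Int)), Dom_get_gift_index gift_status → Pre_get_gift_index gift_status → Spec_get_gift_index gift_status (get_gift_index gift_status)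

-- ===== LEMMAS AND PROOFS =====

-- the running column-sum fold, characterised pointwise
theorem recv_fold_char (gs : List (List Int)) :
    ∀ (acc : List Int), (∀ row ∈ gs, acc.length ≤ row.length) →
      gs.foldl (fun b row => List.zipWith (fun r x => r + x) b row) acc =
        (List.range acc.length).map
          (fun j => acc.getD j 0 + ((gs.map (fun r => r.getD j 0)).sum)) := by
  induction gs with
  | nil =>
    intro acc _
    apply List.ext_getElem
    · simp
    · intro i h1 h2
      simp only [List.foldl_nil] at h1
      simp [List.getD, List.getElem?_eq_getElem h1]
  | cons r rs ih =>
    intro acc hlen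
    have hr : acc.length ≤ r.length := hlen r (by simp)
    have hz : (List.zipWith (fun r x => r + x) acc r).length = acc.length := by
      simp [List.length_zipWith]; omega
    rw [List.foldl_cons, ih _ (by intro row hm; rw [hz]; exact hlen row (by simp [hm]))]
    rw [hz]
    apply List.map_congr_left
    intro j hj
    simp only [List.mem_range] at hj
    have hjr : j < r.length := lt_of_lt_of_le hj hr
    simp [List.getD, List.getElem?_eq_getElem (hz ▸ hj), List.getElem?_eq_getElem hj,
      List.getElem?_eq_getElem hjr, List.getElem_zipWith]
    ring

theorem get_gift_index_spec : Claim_equal_get_gift_index := by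
  intro gs _ hpre
  unfold Spec_get_gift_index get_gift_index get_gift_index_alt
  simp only []
  -- B side: split the pair fold
  rw [PySem.List.foldl_prod_mk
      (f := fun (a : List Int) (row : List Int) => a ++ [row.sum])
      (g := fun (b : List Int) (row : List Int) => List.zipWith (fun r x => r + x) b row)]
  simp only
  rw [PySem.List.foldl_append_singleton_eq_map, List.nil_append]
  rw [recv_fold_char gs (List.replicate gs.length 0) (by simpa using hpre)]
  -- A side: the append loop is a map over range
  rw [PySem.List.foldl_append_singleton_eq_map, List.nil_append]
  simp only [PySem.List.pyRange_zero_natCast, List.map_map]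
  simp only [List.length_replicate]
  apply List.ext_getElem
  · simp [List.length_zipWith]
  · intro k hk1 hk2
    simp only [List.getElem_map, List.getElem_range, Function.comp,
      List.getElem_zipWith, PySem.List.pyGetD_natCast]
    have hk : k < gs.length := by simpa using hk1
    congr 1
    · simp [List.getElem?_eq_getElem hk]
    · rw [show (List.replicate gs.length (0:Int)).getD k 0 = 0 from by simp [List.getD], zero_add]
      congr 1
      apply List.ext_getElem
      · simp
      · intro j hj1 hj2
        have hj : j < gs.length := by simpa using hj1
        simp [List.getD, List.getElem?_eq_getElem hj]

-- ===== VERDICT (by name: the statement is the Claim_ definition above) =====
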